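-- pv_equiv track=rewrite | github.com/Voytima/PY_algorythms | Lesson_1/Lesson_1_task_1.py | sum_mult
-- ===== SOURCE A (Python) =====
-- def sum_mult(number):
--     summ = 0
--     mult = 1
--     if number == 0:
--         mult = 0
--     while number > 0:
--         rest_num = number % 10
--         if rest_num != 0:
--             summ += rest_num
--             mult *= rest_num
--         number //= 10
--         if rest_num == 0:
--             mult = 0
--     # if number == 0:
--     #     mult = 0
--     return f'Сумма чисел: {summ}\nПроизведение чисел: {mult}'
-- ===== SOURCE B (Python) =====
-- def sum_mult(number):
--     if number > 0:
--         digits = [int(c) for c in str(number)]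
--         summ = sum(digits)
--         mult = 1
--         for d in digits:
--             mult *= d
--     else:
--         summ = 0
--         mult = 0 if number == 0 else 1
--     return f'Сумма чисел: {summ}\nПроизведение чисел: {mult}'
-- ===== Notes on version B (the rewrite author's own statement) =====
-- stated objective: idiomatic
-- what changed: Replaces A's modulo/floor-division while-loop with its mutable flag logic by extracting the digits once from str(number) and aggregating them with sum() and a plain product fold; the non-positive cases are handled by a direct guard.
import Mathlib
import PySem

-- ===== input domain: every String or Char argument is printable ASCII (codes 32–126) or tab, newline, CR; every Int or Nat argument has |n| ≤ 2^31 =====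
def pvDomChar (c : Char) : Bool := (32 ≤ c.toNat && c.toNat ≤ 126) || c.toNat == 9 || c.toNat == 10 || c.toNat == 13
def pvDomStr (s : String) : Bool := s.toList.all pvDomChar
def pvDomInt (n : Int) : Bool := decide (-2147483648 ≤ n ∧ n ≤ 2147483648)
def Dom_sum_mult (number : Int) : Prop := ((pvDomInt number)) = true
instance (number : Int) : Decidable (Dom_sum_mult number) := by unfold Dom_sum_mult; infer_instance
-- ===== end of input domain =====

-- B replaces A's modulo/floor-division digit loop (with its in-loop zero flag) by a str(number)
-- digit-list traversal aggregated with sum() and a product fold; same return value, no side effects.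

-- ===== PORT A =====
-- the while loop: state (number, summ, mult)
def sumMultLoop (number summ mult : Int) : Int × Int :=
  if h : 0 < number then
    let rest_num := PySem.Int.mod number 10
    let summ' := if rest_num ≠ 0 then summ + rest_num else summ
    let mult' := if rest_num ≠ 0 then mult * rest_num else mult
    let number' := PySem.Int.floordiv number 10
    let mult'' := if rest_num = 0 then 0 else mult'
    sumMultLoop number' summ' mult''
  else (summ, mult)
termination_by number.toNat
decreasing_by
  rw [PySem.Int.floordiv_eq_ediv_of_pos (by norm_num : (0:Int) < 10)]
  omega

def sum_mult (number : Int) : String :=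
  let summ : Int := 0
  let mult : Int := if number = 0 then 0 else 1
  let r := sumMultLoop number summ mult
  "Сумма чисел: " ++ PySem.Int.toStr r.1 ++ "\nПроизведение чисел: " ++ PySem.Int.toStr r.2

-- ===== PORT B =====
-- int(c) for one char of str(number); those chars are always decimal digits, so the
-- .getD 0 default is never taken (Python's int(c) returns on every input reached here).
def sum_mult_alt (number : Int) : String :=
  if 0 < number then
    let digits := (PySem.Int.toChars number).map (fun c => (PySem.Int.ofChars? [c]).getD 0)
    let summ := digits.sum
    let mult := digits.foldl (· * ·) 1
    "Сумма чисел: " ++ PySem.Int.toStr summ ++ "\nПроизведение чисел: " ++ PySem.Int.toStr mult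
  else
    let summ : Int := 0
    let mult : Int := if number = 0 then 0 else 1
    "Сумма чисел: " ++ PySem.Int.toStr summ ++ "\nПроизведение чисел: " ++ PySem.Int.toStr mult

-- ===== PRECONDITION & SPEC =====
def Spec_sum_mult (number : Int) (out : String) : Prop := out = sum_mult_alt number
instance (number : Int) (out : String) : Decidable (Spec_sum_mult number out) := by unfold Spec_sum_mult; infer_instance

-- ===== CLAIM (what is proved, stated in full; the proofs are below) =====
def Claim_equal_sum_mult : Prop := ∀ (number : Int), Dom_sum_mult number → Spec_sum_mult number (sum_mult number)

-- ===== LEMMAS AND PROOFS =====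

-- B's digit list of a positive n, as integers
def digitsInt (n : Nat) : List Int :=
  (Nat.toDigits 10 n).map (fun c => (PySem.Int.ofChars? [c]).getD 0)

theorem toDigitsCore_eat (n : Nat) :
    ∀ (f : Nat) (l : List Char), n < f →
      Nat.toDigitsCore 10 f n l = Nat.toDigitsCore 10 (n + 1) n [] ++ l := by
  induction n using Nat.strong_induction_on with
  | _ n ih =>
    intro f l hf
    match f, hf with
    | f + 1, hf =>
      rw [Nat.toDigitsCore]
      by_cases hn : n / 10 = 0
      · conv_rhs => rw [Nat.toDigitsCore]
        simp [hn]
      · have hnpos : 0 < n := by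
          rcases Nat.eq_zero_or_pos n with h | h
          · exact absurd (by simp [h]) hn
          · exact h
        have h1 : n / 10 < n := Nat.div_lt_self hnpos (by norm_num)
        rw [if_neg hn, ih (n / 10) h1 f _ (by omega)]
        conv_rhs => rw [Nat.toDigitsCore]
        rw [if_neg hn, ih (n / 10) h1 n _ (by omega)]
        simp

theorem toDigits_step (n : Nat) (h : 10 ≤ n) :
    Nat.toDigits 10 n = Nat.toDigits 10 (n / 10) ++ [Nat.digitChar (n % 10)] := by
  have hn : n / 10 ≠ 0 := by omega
  rw [Nat.toDigits, Nat.toDigitsCore, if_neg hn,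
      toDigitsCore_eat (n / 10) n _ (by omega)]
  rfl

theorem digitChar_val (d : Nat) (h : d < 10) :
    (PySem.Int.ofChars? [Nat.digitChar d]).getD 0 = (d : Int) := by
  interval_cases d <;> decide

theorem digitsInt_small (n : Nat) (h0 : 0 < n) (h : n < 10) : digitsInt n = [(n : Int)] := by
  interval_cases n <;> decide

theorem digitsInt_step (n : Nat) (h : 10 ≤ n) :
    digitsInt n = digitsInt (n / 10) ++ [((n % 10 : Nat) : Int)] := by
  unfold digitsInt
  rw [toDigits_step n h, List.map_append]
  simp [digitChar_val (n % 10) (Nat.mod_lt _ (by norm_num))]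

theorem foldl_mul_int (l : List Int) (m : Int) : l.foldl (· * ·) m = m * l.prod := by
  induction l generalizing m with
  | nil => simp
  | cons x xs ih => simp [List.foldl_cons, ih, List.prod_cons]; ring

theorem loop_eq (n : Nat) :
    ∀ (s m : Int), 0 < n →
      sumMultLoop (n : Int) s m = (s + (digitsInt n).sum, m * (digitsInt n).prod) := by
  induction n using Nat.strong_induction_on with
  | _ n ih =>
    intro s m hn
    have hpos : (0 : Int) < (n : Int) := by exact_mod_cast hn
    have hmod : PySem.Int.mod ((n : Nat) : Int) 10 = ((n % 10 : Nat) : Int) := by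
      exact_mod_cast PySem.Int.mod_natCast n 10
    have hdiv : PySem.Int.floordiv ((n : Nat) : Int) 10 = ((n / 10 : Nat) : Int) := by
      exact_mod_cast PySem.Int.floordiv_natCast n 10
    rw [sumMultLoop, dif_pos hpos]
    simp only [hmod, hdiv]
    by_cases h10 : n < 10
    · have hm : n % 10 = n := Nat.mod_eq_of_lt h10
      have hd : n / 10 = 0 := Nat.div_eq_of_lt h10
      have hne : ((n : Nat) : Int) ≠ 0 := by exact_mod_cast hn.ne'
      rw [digitsInt_small n hn h10]
      simp only [hm, hd, Nat.cast_zero]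
      rw [sumMultLoop]
      simp
      split_ifs with h1
      · exact absurd h1 (by omega)
      · rfl
    · have hge : 10 ≤ n := by omega
      have hdpos : 0 < n / 10 := by omega
      have h1 : n / 10 < n := Nat.div_lt_self hn (by norm_num)
      rw [ih (n / 10) h1 _ _ hdpos, digitsInt_step n hge]
      by_cases hr : n % 10 = 0
      · have hri : ((n % 10 : Nat) : Int) = 0 := by exact_mod_cast hr
        simp [hri, List.sum_append, List.prod_append]
      · have hri : ((n % 10 : Nat) : Int) ≠ 0 := by exact_mod_cast hr
        have hnd : ¬ (10 : Int) ∣ (n : Int) := by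
          exact_mod_cast (by omega : ¬ (10 : Nat) ∣ n)
        simp only [if_pos hri, ne_eq]
        simp [List.sum_append, List.prod_append, hnd]
        constructor
        · ring
        · ring

-- ===== VERDICT (by name: the statement is the Claim_ definition above) =====
theorem sumMultLoop_nonpos (number s m : Int) (h : ¬ 0 < number) :
    sumMultLoop number s m = (s, m) := by
  rw [sumMultLoop, dif_neg h]

theorem sum_mult_spec : Claim_equal_sum_mult := by
  intro number _
  show sum_mult number = sum_mult_alt number
  by_cases hpos : 0 < number
  · have hn : number = ((number.toNat : Nat) : Int) := (Int.toNat_of_nonneg (le_of_lt hpos)).symm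
    have hnat : 0 < number.toNat := by omega
    have hne : number ≠ 0 := hpos.ne'
    unfold sum_mult sum_mult_alt
    rw [if_pos hpos]
    simp only [if_neg hne]
    rw [hn, loop_eq number.toNat 0 1 hnat]
    have hchars : PySem.Int.toChars ((number.toNat : Nat) : Int) = Nat.toDigits 10 number.toNat := by
      rw [PySem.Int.toChars, if_neg (by omega), Int.toNat_natCast]
    rw [hchars]
    show _ = "Сумма чисел: " ++ PySem.Int.toStr (digitsInt number.toNat).sum ++
          "\nПроизведение чисел: " ++ PySem.Int.toStr ((digitsInt number.toNat).foldl (· * ·) 1)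
    rw [foldl_mul_int]
    simp
  · unfold sum_mult sum_mult_alt
    rw [if_neg hpos]
    simp [sumMultLoop_nonpos number _ _ hpos]
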